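-- pv_equiv track=rewrite | github.com/mguarnieri/revizor | src/helpers.py | get_prng_state_after_iterations
-- ===== SOURCE A (Python) =====
-- def get_prng_state_after_iterations(seed: int, num_iterations: int) -> int:
--     # each test case (and, accordingly, each iteration) generates 7 random values
--     total_executions = num_iterations * 7
--     state = seed
--     mod = pow(2, 64)
--
--     for i in range(0, total_executions):
--         state = (state * 2891336453) % mod
--         state = (state + 12345) % mod
--     return state
-- ===== SOURCE B (Python) =====
-- def get_prng_state_after_iterations(seed: int, num_iterations: int) -> int:
--     # Compose the affine map x -> (2891336453*x + 12345) mod 2**64 with itself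
--     # 7*num_iterations times by binary exponentiation of affine maps.
--     MOD = 2 ** 64
--     k = 7 * num_iterations
--     if k <= 0:
--         return seed  # no iterations: state unchanged
--     ra, rc = 1, 0                  # accumulated map: identity
--     ba, bc = 2891336453, 12345     # base map
--     while k > 0:
--         if k & 1:
--             ra, rc = (ba * ra) % MOD, (ba * rc + bc) % MOD
--         ba, bc = (ba * ba) % MOD, (ba * bc + bc) % MOD
--         k >>= 1
--     return (ra * seed + rc) % MOD
-- ===== Notes on version B (the rewrite author's own statement) =====
-- stated objective: faster
-- what changed: Replaces the step-by-step LCG loop (7*n modular steps) by binary exponentiation of the affine map x -> (a*x+c) mod 2^64, composing O(log n) squared maps and applying the result to the seed once.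
import Mathlib
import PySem

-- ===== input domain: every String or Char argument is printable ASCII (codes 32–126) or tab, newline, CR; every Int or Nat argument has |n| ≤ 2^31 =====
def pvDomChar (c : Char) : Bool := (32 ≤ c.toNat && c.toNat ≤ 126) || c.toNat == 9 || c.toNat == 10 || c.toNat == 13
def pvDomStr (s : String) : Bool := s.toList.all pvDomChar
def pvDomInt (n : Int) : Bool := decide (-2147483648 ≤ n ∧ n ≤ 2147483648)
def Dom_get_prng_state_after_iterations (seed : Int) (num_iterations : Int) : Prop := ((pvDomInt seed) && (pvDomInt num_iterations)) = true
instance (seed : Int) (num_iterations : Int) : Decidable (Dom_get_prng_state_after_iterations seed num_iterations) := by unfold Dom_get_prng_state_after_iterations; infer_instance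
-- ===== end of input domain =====

-- B replaces the O(n) step-by-step LCG loop by O(log n) binary exponentiation of the affine map.

-- ===== PORT A =====
def get_prng_state_after_iterations (seed : Int) (num_iterations : Int) : Int :=
  let total_executions := num_iterations * 7
  let m : Int := 2 ^ 64
  (PySem.List.pyRange 0 total_executions 1).foldl
    (fun state _ => PySem.Int.mod (PySem.Int.mod (state * 2891336453) m + 12345) m) seed

-- ===== PORT B =====
-- the while-loop of Source B: state (ra, rc) = accumulated map, (ba, bc) = base map, k halved each round
def pvAltLoop (k : Nat) (ra rc ba bc : Int) : Int × Int :=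
  if k = 0 then (ra, rc)
  else
    let p := if k % 2 = 1 then ((ba * ra) % (2 ^ 64 : Int), (ba * rc + bc) % (2 ^ 64 : Int))
             else (ra, rc)
    pvAltLoop (k / 2) p.1 p.2 ((ba * ba) % (2 ^ 64 : Int)) ((ba * bc + bc) % (2 ^ 64 : Int))
termination_by k
decreasing_by exact Nat.div_lt_self (Nat.pos_of_ne_zero (by assumption)) (by norm_num)

def get_prng_state_after_iterations_alt (seed : Int) (num_iterations : Int) : Int :=
  let m : Int := 2 ^ 64
  let k := 7 * num_iterations
  if k ≤ 0 then seed
  else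
    let p := pvAltLoop k.toNat 1 0 2891336453 12345
    (p.1 * seed + p.2) % m

-- ===== PRECONDITION & SPEC =====
def Spec_get_prng_state_after_iterations (seed : Int) (num_iterations : Int) (out : Int) : Prop := out = get_prng_state_after_iterations_alt seed num_iterations
instance (seed : Int) (num_iterations : Int) (out : Int) : Decidable (Spec_get_prng_state_after_iterations seed num_iterations out) := by unfold Spec_get_prng_state_after_iterations; infer_instance

-- ===== CLAIM (what is proved, stated in full; the proofs are below) =====
def Claim_equal_get_prng_state_after_iterations : Prop := ∀ (seed : Int) (num_iterations : Int), Dom_get_prng_state_after_iterations seed num_iterations → Spec_get_prng_state_after_iterations seed num_iterations (get_prng_state_after_iterations seed num_iterations)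

-- ===== LEMMAS AND PROOFS =====

-- pure (mod-free) iteration of the affine map y ↦ a*y + c
def pvIter (a c : Int) : Nat → Int → Int
  | 0, y => y
  | k + 1, y => a * pvIter a c k y + c

lemma pvIter_succ_inner (a c : Int) (k : Nat) (y : Int) :
    pvIter a c (k + 1) y = pvIter a c k (a * y + c) := by
  induction k generalizing y with
  | zero => simp [pvIter]
  | succ n ih => rw [pvIter, ih, ← pvIter, pvIter]

lemma pvIter_double (a c : Int) (m : Nat) (y : Int) :
    pvIter (a * a) (a * c + c) m y = pvIter a c (2 * m) y := by
  induction m generalizing y with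
  | zero => simp [pvIter]
  | succ n ih =>
      rw [pvIter, ih, Nat.mul_succ, pvIter, pvIter]; ring

lemma pvIter_modeq {a a' c c' y y' : Int} (k : Nat) (M : Int)
    (ha : a ≡ a' [ZMOD M]) (hc : c ≡ c' [ZMOD M]) (hy : y ≡ y' [ZMOD M]) :
    pvIter a c k y ≡ pvIter a' c' k y' [ZMOD M] := by
  induction k with
  | zero => simpa [pvIter] using hy
  | succ n ih => exact (ha.mul ih).add hc

lemma emod_modeq (x : Int) (M : Int) : x % M ≡ x [ZMOD M] := Int.emod_emod_of_dvd x dvd_rfl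

-- invariant of Source B's while loop
lemma pvAltLoop_spec (k : Nat) (ra rc ba bc x : Int) :
    (pvAltLoop k ra rc ba bc).1 * x + (pvAltLoop k ra rc ba bc).2
      ≡ pvIter ba bc k (ra * x + rc) [ZMOD (2 ^ 64 : Int)] := by
  induction k using Nat.strong_induction_on generalizing ra rc ba bc with
  | _ k ih =>
    rw [pvAltLoop]
    by_cases hk : k = 0
    · simp [hk, pvIter]
    · simp only [hk, if_false]
      have hrec := ih (k / 2) (Nat.div_lt_self (Nat.pos_of_ne_zero hk) (by norm_num))
      by_cases hodd : k % 2 = 1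
      · rw [if_pos hodd]
        refine (hrec _ _ _ _).trans ?_
        have h1 : pvIter (ba * ba % (2^64:Int)) ((ba * bc + bc) % (2^64:Int)) (k / 2)
            ((ba * ra % (2^64:Int)) * x + (ba * rc + bc) % (2^64:Int))
            ≡ pvIter (ba * ba) (ba * bc + bc) (k / 2) (ba * (ra * x + rc) + bc) [ZMOD (2^64:Int)] := by
          refine pvIter_modeq _ _ (emod_modeq _ _) (emod_modeq _ _) ?_
          have h2 : ba * (ra * x + rc) + bc = (ba * ra) * x + (ba * rc + bc) := by ring
          rw [h2]
          exact ((emod_modeq _ _).mul_right x).add (emod_modeq _ _)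
        refine h1.trans ?_
        rw [pvIter_double, ← pvIter_succ_inner]
        have hk2 : 2 * (k / 2) + 1 = k := by omega
        rw [hk2]
      · rw [if_neg hodd]
        refine (hrec _ _ _ _).trans ?_
        have h1 : pvIter (ba * ba % (2^64:Int)) ((ba * bc + bc) % (2^64:Int)) (k / 2) (ra * x + rc)
            ≡ pvIter (ba * ba) (ba * bc + bc) (k / 2) (ra * x + rc) [ZMOD (2^64:Int)] :=
          pvIter_modeq _ _ (emod_modeq _ _) (emod_modeq _ _) (Int.ModEq.refl _)
        refine h1.trans ?_
        rw [pvIter_double]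
        have hk2 : 2 * (k / 2) = k := by omega
        rw [hk2]

-- A's loop body in terms of pvIter: after k ≥ 1 steps the state is (pvIter a c k seed) % 2^64
lemma pvA_step (M : Int) (hM : (0:Int) < M) (s : Int) :
    PySem.Int.mod (PySem.Int.mod (s * 2891336453) M + 12345) M
      = (2891336453 * s + 12345) % M := by
  rw [PySem.Int.mod_eq_emod_of_pos hM, PySem.Int.mod_eq_emod_of_pos hM, mul_comm s]
  exact (emod_modeq (2891336453 * s) M).add_right 12345

lemma pvA_foldl (k : Nat) (s : Int) (hk : 1 ≤ k) :
    (List.range k).foldl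
      (fun state _ => PySem.Int.mod (PySem.Int.mod (state * 2891336453) (2^64:Int) + 12345) (2^64:Int)) s
      = pvIter 2891336453 12345 k s % (2 ^ 64 : Int) := by
  induction k with
  | zero => omega
  | succ n ih =>
    rw [List.range_succ, List.foldl_append, List.foldl_cons, List.foldl_nil]
    by_cases hn : 1 ≤ n
    · rw [ih hn, pvA_step _ (by norm_num), pvIter]
      exact ((emod_modeq _ _).mul_left 2891336453).add_right 12345
    · have hzero : n = 0 := by omega
      subst hzero
      simp only [List.range_zero, List.foldl_nil]
      rw [pvA_step _ (by norm_num), pvIter, pvIter]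

-- ===== VERDICT (by name: the statement is the Claim_ definition above) =====
theorem get_prng_state_after_iterations_spec : Claim_equal_get_prng_state_after_iterations := by
  intro seed n _
  unfold Spec_get_prng_state_after_iterations get_prng_state_after_iterations get_prng_state_after_iterations_alt
  simp only []
  by_cases h : 7 * n ≤ 0
  · rw [if_pos h, PySem.List.pyRange_one_eq_nil (by omega), List.foldl_nil]
  · rw [if_neg h]
    rw [PySem.List.pyRange_one, List.foldl_map]
    have hsub : (n * 7 - 0 : Int) = 7 * n := by ring
    rw [hsub]
    have hk : 1 ≤ (7 * n).toNat := by omega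
    rw [pvA_foldl _ _ hk]
    have := pvAltLoop_spec (7 * n).toNat 1 0 2891336453 12345 seed
    have hseed : (1:Int) * seed + 0 = seed := by ring
    rw [hseed] at this
    exact this.symm
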